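-- pv_equiv track=rewrite | github.com/MoutonBinoclard/Maths-Info-2025 | Ex00.py | somcube
-- ===== SOURCE A (Python) =====
-- def somcube(n): # fonction qui retourne la somme des cubes des chiffres de n
--     chiffres = []
--     while n > 0:
--         chiffres.append(n % 10)
--         n //= 10
--
--     # On a la liste des chiffres d'un nombre, il suffit de la mettre au cube
--
--     somme = 0
--     for chiffre in chiffres:
--         somme += chiffre ** 3
--
--     return somme
-- ===== SOURCE B (Python) =====
-- def somcube(n):
--     # sum of cubes of decimal digits of n, via its string representation
--     return sum(int(d) ** 3 for d in str(n)) if n > 0 else 0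
-- ===== Notes on version B (the rewrite author's own statement) =====
-- stated objective: idiomatic
-- what changed: B converts n to its decimal string and sums the cubes of the character digits in one expression, instead of A's while-loop that builds a digit list by repeated modulus and integer division followed by a second accumulation loop.
import Mathlib
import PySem

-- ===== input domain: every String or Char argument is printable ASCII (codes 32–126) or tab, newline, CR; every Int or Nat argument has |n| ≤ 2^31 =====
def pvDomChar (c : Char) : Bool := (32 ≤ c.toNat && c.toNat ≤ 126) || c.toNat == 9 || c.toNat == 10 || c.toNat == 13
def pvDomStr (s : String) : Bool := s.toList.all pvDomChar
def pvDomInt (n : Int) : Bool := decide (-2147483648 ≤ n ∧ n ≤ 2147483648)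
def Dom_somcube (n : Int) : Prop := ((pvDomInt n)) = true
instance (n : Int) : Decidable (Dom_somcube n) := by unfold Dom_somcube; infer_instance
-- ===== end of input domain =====

-- B replaces A's digit-extraction loop (repeated modulus and integer division) plus summation loop by one pass over str(n)'s characters; idiomatic, same cost.


-- ===== PORT A =====
-- the while loop extracting digits by modulus and integer division (list in append order)
def somcubeDigits (n : Int) : List Int :=
  if 0 < n then
    PySem.Int.mod n 10 :: somcubeDigits (PySem.Int.floordiv n 10)
  else []
termination_by n.toNat
decreasing_by
  have h10 : PySem.Int.floordiv n 10 = n / 10 := by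
    show n.fdiv 10 = n / 10
    rw [Int.fdiv_eq_ediv]
    simp
  simp only [h10]
  omega

def somcube (n : Int) : Int :=
  (somcubeDigits n).foldl (fun somme chiffre => somme + chiffre ^ 3) 0

-- ===== PORT B =====
-- int(d) for a single decimal-digit character d is ported by hand as (d.toNat - 48);
-- exact because str(n) for n > 0 consists of digit characters only.
def somcube_alt (n : Int) : Int :=
  if 0 < n then
    ((PySem.Int.toStr n).toList.map (fun d => ((d.toNat : Int) - 48) ^ 3)).sum
  else 0

-- ===== PRECONDITION & SPEC =====
def Spec_somcube (n : Int) (out : Int) : Prop := out = somcube_alt n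
instance (n : Int) (out : Int) : Decidable (Spec_somcube n out) := by unfold Spec_somcube; infer_instance

-- ===== CLAIM (what is proved, stated in full; the proofs are below) =====
def Claim_equal_somcube : Prop := ∀ (n : Int), Dom_somcube n → Spec_somcube n (somcube n)

-- ===== LEMMAS AND PROOFS =====

-- decimal digits of m, most significant first, as characters (reference shape of Nat.toDigits)
def revDigs (m : Nat) : List Char :=
  if m = 0 then [] else revDigs (m / 10) ++ [Nat.digitChar (m % 10)]
decreasing_by omega

lemma toDigitsCore_eq_revDigs :
    ∀ (f n : Nat) (l : List Char), n < f → 0 < n →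
      Nat.toDigitsCore 10 f n l = revDigs n ++ l := by
  intro f
  induction f with
  | zero => intro n l h; omega
  | succ f ih =>
    intro n l h hn
    rw [Nat.toDigitsCore]
    by_cases h0 : n / 10 = 0
    · simp only [h0, if_pos]
      rw [revDigs.eq_def, if_neg (by omega), h0, revDigs.eq_def]
      simp
    · rw [if_neg h0, ih (n / 10) _ (by omega) (by omega)]
      conv_rhs => rw [revDigs.eq_def]
      simp only [if_neg (show ¬ n = 0 by omega)]
      simp

lemma cube_digitChar (d : Nat) (hd : d < 10) :
    (((Nat.digitChar d).toNat : Int) - 48) ^ 3 = (d : Int) ^ 3 := by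
  interval_cases d <;> decide

-- cube sum over revDigs, recursively
lemma revDigs_sum (m : Nat) :
    ((revDigs m).map (fun d => ((d.toNat : Int) - 48) ^ 3)).sum
      = if m = 0 then 0
        else ((revDigs (m / 10)).map (fun d => ((d.toNat : Int) - 48) ^ 3)).sum
              + ((m % 10 : Nat) : Int) ^ 3 := by
  by_cases h : m = 0
  · rw [if_pos h, h, revDigs.eq_def]
    simp
  · rw [if_neg h]
    conv_lhs => rw [revDigs.eq_def]
    rw [if_neg h]
    simp [cube_digitChar (m % 10) (by omega)]

lemma foldl_cube (l : List Int) (a : Int) :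
    l.foldl (fun somme chiffre => somme + chiffre ^ 3) a
      = a + (l.map (fun c => c ^ 3)).sum := by
  induction l generalizing a with
  | nil => simp
  | cons x xs ih => simp [List.foldl, ih]; ring

lemma somcubeDigits_sum (m : Nat) :
    ((somcubeDigits (m : Int)).map (fun c => c ^ 3)).sum
      = ((revDigs m).map (fun d => ((d.toNat : Int) - 48) ^ 3)).sum := by
  induction m using Nat.strong_induction_on with
  | _ m ih =>
    by_cases h : m = 0
    · subst h
      rw [somcubeDigits.eq_def, if_neg (by omega), revDigs.eq_def]
      simp
    · rw [somcubeDigits.eq_def, if_pos (by exact_mod_cast Nat.pos_of_ne_zero h),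
          revDigs_sum, if_neg h]
      have hmod : PySem.Int.mod (m : Int) 10 = ((m % 10 : Nat) : Int) := by
        simp [PySem.Int.mod, Int.fmod_eq_emod]
      have hdiv : PySem.Int.floordiv (m : Int) 10 = ((m / 10 : Nat) : Int) := by
        simp [PySem.Int.floordiv, Int.fdiv_eq_ediv]
      rw [hmod, hdiv]
      simp only [List.map, List.sum_cons]
      rw [ih (m / 10) (by omega)]
      ring

-- ===== VERDICT (by name: the statement is the Claim_ definition above) =====
theorem somcube_spec : Claim_equal_somcube := by
  intro n _
  unfold Spec_somcube somcube somcube_alt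
  by_cases h : 0 < n
  · rw [if_pos h, foldl_cube, zero_add]
    have hn : n = ((n.toNat : Nat) : Int) := by omega
    rw [hn, somcubeDigits_sum]
    have : (PySem.Int.toStr ((n.toNat : Nat) : Int)).toList
        = Nat.toDigits 10 n.toNat := by
      rw [PySem.Int.toList_toStr, PySem.Int.toChars]
      rw [if_neg (by omega)]
      congr 1
    rw [this, Nat.toDigits,
        toDigitsCore_eq_revDigs (n.toNat + 1) n.toNat [] (by omega) (by omega)]
    simp
  · rw [if_neg h, somcubeDigits.eq_def, if_neg h]
    simp
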